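-- pv_equiv track=rewrite | github.com/astrid-ljy/AIAgentRepo | test/entity_context.py | _identify_business_columns
-- ===== SOURCE A (Python) =====
-- from typing import Dict, Any, List
--
-- def _identify_business_columns(columns: List[str]) -> Dict[str, List[str]]:
--     """Identify business-relevant columns for different types of analysis."""
--     business_columns = {
--         "price_metrics": [],
--         "sales_metrics": [],
--         "quantity_metrics": [],
--         "time_metrics": [],
--         "geographic_metrics": [],
--         "quality_metrics": [],
--         "identifier_columns": [],
--         "physical_dimensions": []
--     }
--
--     for col in columns:
--         col_lower = col.lower()
--
--         # Price and financial metrics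
--         if any(word in col_lower for word in ["price", "payment", "value", "cost", "revenue"]):
--             business_columns["price_metrics"].append(col)
--             business_columns["sales_metrics"].append(col)
--
--         # Quantity metrics
--         if any(word in col_lower for word in ["qty", "quantity", "count", "number", "total"]):
--             business_columns["quantity_metrics"].append(col)
--
--         # Time metrics
--         if any(word in col_lower for word in ["date", "time", "timestamp", "created", "updated"]):
--             business_columns["time_metrics"].append(col)
--
--         # Geographic metrics
--         if any(word in col_lower for word in ["city", "state", "zip", "location", "geo", "lat", "lng"]):
--             business_columns["geographic_metrics"].append(col)
--
--         # Quality metrics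
--         if any(word in col_lower for word in ["score", "rating", "review", "satisfaction"]):
--             business_columns["quality_metrics"].append(col)
--
--         # Identifiers
--         if any(word in col_lower for word in ["id", "key", "code"]):
--             business_columns["identifier_columns"].append(col)
--
--         # Physical dimensions
--         if any(word in col_lower for word in ["weight", "length", "height", "width", "cm", "kg"]):
--             business_columns["physical_dimensions"].append(col)
--
--     return business_columns
-- ===== SOURCE B (Python) =====
-- from typing import Dict, List
--
-- # keyword -> categories it triggers; the scan enumerates substrings of each column
-- # and looks them up here, instead of searching each keyword in the column.
-- _KEYWORD_CATS = {
--     "price": ("price_metrics", "sales_metrics"),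
--     "payment": ("price_metrics", "sales_metrics"),
--     "value": ("price_metrics", "sales_metrics"),
--     "cost": ("price_metrics", "sales_metrics"),
--     "revenue": ("price_metrics", "sales_metrics"),
--     "qty": ("quantity_metrics",),
--     "quantity": ("quantity_metrics",),
--     "count": ("quantity_metrics",),
--     "number": ("quantity_metrics",),
--     "total": ("quantity_metrics",),
--     "date": ("time_metrics",),
--     "time": ("time_metrics",),
--     "timestamp": ("time_metrics",),
--     "created": ("time_metrics",),
--     "updated": ("time_metrics",),
--     "city": ("geographic_metrics",),
--     "state": ("geographic_metrics",),
--     "zip": ("geographic_metrics",),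
--     "location": ("geographic_metrics",),
--     "geo": ("geographic_metrics",),
--     "lat": ("geographic_metrics",),
--     "lng": ("geographic_metrics",),
--     "score": ("quality_metrics",),
--     "rating": ("quality_metrics",),
--     "review": ("quality_metrics",),
--     "satisfaction": ("quality_metrics",),
--     "id": ("identifier_columns",),
--     "key": ("identifier_columns",),
--     "code": ("identifier_columns",),
--     "weight": ("physical_dimensions",),
--     "length": ("physical_dimensions",),
--     "height": ("physical_dimensions",),
--     "width": ("physical_dimensions",),
--     "cm": ("physical_dimensions",),
--     "kg": ("physical_dimensions",),
-- }
--
-- _LENS = sorted({len(k) for k in _KEYWORD_CATS})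
--
-- _CATEGORIES = [
--     "price_metrics", "sales_metrics", "quantity_metrics", "time_metrics",
--     "geographic_metrics", "quality_metrics", "identifier_columns",
--     "physical_dimensions",
-- ]
--
-- def _hit_categories(low):
--     """Categories triggered by low: enumerate its substrings of the keyword
--     lengths and look each up in the keyword hash map (one dict lookup per
--     substring, no per-keyword search)."""
--     hit = set()
--     for L in _LENS:
--         for i in range(len(low) - L + 1):
--             hit.update(_KEYWORD_CATS.get(low[i:i + L], ()))
--     return hit
--
-- def _identify_business_columns(columns: List[str]) -> Dict[str, List[str]]:
--     """Identify business-relevant columns for different types of analysis."""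
--     hits = [(col, _hit_categories(col.lower())) for col in columns]
--     return {c: [col for col, h in hits if c in h] for c in _CATEGORIES}
-- ===== Notes on version B (the rewrite author's own statement) =====
-- stated objective: alternative
-- what changed: Inverts the matching: instead of searching each of the 35 keywords inside each column (seven per-column if-blocks), B enumerates each lowercased column's substrings of the keyword lengths and looks each up in a keyword->categories hash map, accumulating a per-column hit set; the dict of eight category lists is then assembled from those hit sets.
import Mathlib
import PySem

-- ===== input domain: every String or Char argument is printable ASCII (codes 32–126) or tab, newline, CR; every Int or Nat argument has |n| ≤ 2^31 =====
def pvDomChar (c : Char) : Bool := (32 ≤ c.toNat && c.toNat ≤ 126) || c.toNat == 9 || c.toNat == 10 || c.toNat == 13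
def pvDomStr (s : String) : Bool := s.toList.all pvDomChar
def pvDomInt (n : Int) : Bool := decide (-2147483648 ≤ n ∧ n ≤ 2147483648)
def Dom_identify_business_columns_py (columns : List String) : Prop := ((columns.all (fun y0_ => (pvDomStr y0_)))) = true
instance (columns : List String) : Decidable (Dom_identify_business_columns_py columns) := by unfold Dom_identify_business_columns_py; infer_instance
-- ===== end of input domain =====

-- B inverts the matching: it enumerates each lowercased column's substrings of the
-- keyword lengths and looks each up in a keyword->categories map, accumulating a
-- per-column hit set, instead of searching every keyword in every column (objective: alternative).

-- ===== PORT A =====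
-- state of A's dict: the eight lists, in key order
def pvStateA := List String × List String × List String × List String ×
                List String × List String × List String × List String

-- any(word in col_lower for word in ws)
def pvAnyA (ws : List String) (cl : String) : Bool := ws.any (fun w => PySem.Str.isIn w cl)

def pvStepA (st : pvStateA) (col : String) : pvStateA :=
  match st with
  | (p, s, q, t, g, u, i, ph) =>
    let cl := PySem.Str.lower col
    let p := if pvAnyA ["price", "payment", "value", "cost", "revenue"] cl then p ++ [col] else p
    let s := if pvAnyA ["price", "payment", "value", "cost", "revenue"] cl then s ++ [col] else s
    let q := if pvAnyA ["qty", "quantity", "count", "number", "total"] cl then q ++ [col] else q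
    let t := if pvAnyA ["date", "time", "timestamp", "created", "updated"] cl then t ++ [col] else t
    let g := if pvAnyA ["city", "state", "zip", "location", "geo", "lat", "lng"] cl then g ++ [col] else g
    let u := if pvAnyA ["score", "rating", "review", "satisfaction"] cl then u ++ [col] else u
    let i := if pvAnyA ["id", "key", "code"] cl then i ++ [col] else i
    let ph := if pvAnyA ["weight", "length", "height", "width", "cm", "kg"] cl then ph ++ [col] else ph
    (p, s, q, t, g, u, i, ph)

def identify_business_columns_py (columns : List String) : List (String × List String) :=
  match columns.foldl pvStepA ([], [], [], [], [], [], [], []) with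
  | (p, s, q, t, g, u, i, ph) =>
    [("price_metrics", p), ("sales_metrics", s), ("quantity_metrics", q), ("time_metrics", t),
     ("geographic_metrics", g), ("quality_metrics", u), ("identifier_columns", i),
     ("physical_dimensions", ph)]

-- ===== PORT B =====
-- _KEYWORD_CATS: keyword -> categories it triggers
def pvKwMap : PySem.Dict String (List String) := PySem.Dict.ofList
  [("price", ["price_metrics", "sales_metrics"]),
   ("payment", ["price_metrics", "sales_metrics"]),
   ("value", ["price_metrics", "sales_metrics"]),
   ("cost", ["price_metrics", "sales_metrics"]),
   ("revenue", ["price_metrics", "sales_metrics"]),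
   ("qty", ["quantity_metrics"]), ("quantity", ["quantity_metrics"]),
   ("count", ["quantity_metrics"]), ("number", ["quantity_metrics"]),
   ("total", ["quantity_metrics"]),
   ("date", ["time_metrics"]), ("time", ["time_metrics"]),
   ("timestamp", ["time_metrics"]), ("created", ["time_metrics"]),
   ("updated", ["time_metrics"]),
   ("city", ["geographic_metrics"]), ("state", ["geographic_metrics"]),
   ("zip", ["geographic_metrics"]), ("location", ["geographic_metrics"]),
   ("geo", ["geographic_metrics"]), ("lat", ["geographic_metrics"]),
   ("lng", ["geographic_metrics"]),
   ("score", ["quality_metrics"]), ("rating", ["quality_metrics"]),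
   ("review", ["quality_metrics"]), ("satisfaction", ["quality_metrics"]),
   ("id", ["identifier_columns"]), ("key", ["identifier_columns"]),
   ("code", ["identifier_columns"]),
   ("weight", ["physical_dimensions"]), ("length", ["physical_dimensions"]),
   ("height", ["physical_dimensions"]), ("width", ["physical_dimensions"]),
   ("cm", ["physical_dimensions"]), ("kg", ["physical_dimensions"])]

-- _LENS = sorted({len(k) for k in _KEYWORD_CATS})
def pvLens : List Nat := [2, 3, 4, 5, 6, 7, 8, 9, 12]

def pvCats : List String :=
  ["price_metrics", "sales_metrics", "quantity_metrics", "time_metrics",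
   "geographic_metrics", "quality_metrics", "identifier_columns", "physical_dimensions"]

-- _hit_categories(low): substrings of the keyword lengths, looked up in the map
def pvHits (low : String) : PySem.Set String :=
  pvLens.foldl (fun hit L =>
    (List.range (low.toList.length + 1 - L)).foldl (fun hit (i : Nat) =>
      PySem.Set.update hit
        (PySem.Dict.getD pvKwMap (PySem.Str.slice low (some (i : Int)) (some ((i : Int) + (L : Int)))) []))
      hit) PySem.Set.empty

def identify_business_columns_py_alt (columns : List String) : List (String × List String) :=
  let hits := columns.map (fun col => (col, pvHits (PySem.Str.lower col)))
  pvCats.map (fun c => (c, (hits.filter (fun p => PySem.Set.contains p.2 c)).map (fun p => p.1)))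

-- ===== PRECONDITION & SPEC =====
def Spec_identify_business_columns_py (columns : List String) (out : List (String × List String)) : Prop := out = identify_business_columns_py_alt columns
instance (columns : List String) (out : List (String × List String)) : Decidable (Spec_identify_business_columns_py columns out) := by unfold Spec_identify_business_columns_py; infer_instance

-- ===== CLAIM (what is proved, stated in full; the proofs are below) =====
def Claim_equal_identify_business_columns_py : Prop := ∀ (columns : List String), Dom_identify_business_columns_py columns → Spec_identify_business_columns_py columns (identify_business_columns_py columns)

-- ===== LEMMAS AND PROOFS =====

set_option maxRecDepth 20000

-- A's result, component-wise: initial accumulator followed by the matching columns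
def pvFilt (ws : List String) (cols : List String) : List String :=
  cols.filter (fun col => pvAnyA ws (PySem.Str.lower col))

lemma pvIfApp (C : Bool) (x f : List String) (c : String) :
    (if C = true then x ++ [c] else x) ++ f = x ++ (if C = true then c :: f else f) := by
  cases C <;> simp

lemma pvFoldA_eq (cols : List String) : ∀ (p s q t g u i ph : List String),
    cols.foldl pvStepA (p, s, q, t, g, u, i, ph) =
      (p ++ pvFilt ["price", "payment", "value", "cost", "revenue"] cols,
       s ++ pvFilt ["price", "payment", "value", "cost", "revenue"] cols,
       q ++ pvFilt ["qty", "quantity", "count", "number", "total"] cols,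
       t ++ pvFilt ["date", "time", "timestamp", "created", "updated"] cols,
       g ++ pvFilt ["city", "state", "zip", "location", "geo", "lat", "lng"] cols,
       u ++ pvFilt ["score", "rating", "review", "satisfaction"] cols,
       i ++ pvFilt ["id", "key", "code"] cols,
       ph ++ pvFilt ["weight", "length", "height", "width", "cm", "kg"] cols) := by
  induction cols with
  | nil => simp [pvFilt]
  | cons c cs ih =>
    intro p s q t g u i ph
    simp only [List.foldl_cons, pvStepA]
    rw [ih]
    simp only [pvFilt, List.filter_cons, pvIfApp]

-- membership through a fold whose step adds elements characterised by P
lemma pvMemFoldl {β : Type} (f : β → PySem.Set String → PySem.Set String)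
    (P : β → String → Prop)
    (hf : ∀ e a x, x ∈ f e a ↔ x ∈ a ∨ P e x) (l : List β) :
    ∀ (acc : PySem.Set String) (x : String),
      x ∈ l.foldl (fun a e => f e a) acc ↔ x ∈ acc ∨ ∃ e ∈ l, P e x := by
  induction l with
  | nil => simp
  | cons b bs ih =>
    intro acc x
    simp only [List.foldl_cons, ih, hf]
    constructor
    · rintro (( h | h) | ⟨e, he, hp⟩)
      · exact Or.inl h
      · exact Or.inr ⟨b, by simp, h⟩
      · exact Or.inr ⟨e, by simp [he], hp⟩
    · rintro (h | ⟨e, he, hp⟩)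
      · exact Or.inl (Or.inl h)
      · rcases List.mem_cons.mp he with rfl | he
        · exact Or.inl (Or.inr hp)
        · exact Or.inr ⟨e, he, hp⟩

-- membership in a getD-lookup of pvKwMap, via its items
lemma pvGetD_mem (s : String) (c : String) :
    c ∈ PySem.Dict.getD pvKwMap s [] ↔ ∃ p ∈ pvKwMap.items, p.1 = s ∧ c ∈ p.2 := by
  have hnd : pvKwMap.keys.Nodup := PySem.Dict.nodup_keys_ofList _
  cases h : PySem.Dict.get? pvKwMap s with
  | none =>
    rw [PySem.Dict.getD_eq_get?_getD, h]
    simp only [Option.getD_none, List.mem_nil_iff, false_iff, not_exists]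
    rintro p ⟨hp, hkey, hc⟩
    subst hkey
    exact ((PySem.Dict.get?_eq_none_iff_not_mem_keys pvKwMap p.1).mp h)
      (PySem.Dict.mem_keys_of_mem_items pvKwMap hp)
  | some v =>
    rw [PySem.Dict.getD_eq_get?_getD, h]
    simp only [Option.getD_some]
    constructor
    · intro hc
      exact ⟨(s, v), PySem.Dict.mem_items_of_get?_eq_some pvKwMap h, rfl, hc⟩
    · rintro ⟨p, hp, rfl, hc⟩
      have hv := PySem.Dict.get?_of_mem_items pvKwMap (k := p.1) (v := p.2) (by simpa using hp) hnd
      rw [h] at hv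
      cases hv
      exact hc

-- substring occurrence at a position of the right length ↔ infix
lemma pvSliceInfix (low w : List Char) (L : Nat) (hL : w.length = L) :
    (∃ i, i < low.length + 1 - L ∧ (low.drop i).take L = w) ↔ w <:+: low := by
  constructor
  · rintro ⟨i, _, rfl⟩
    exact ((List.take_prefix _ _).isInfix).trans (List.drop_suffix i low).isInfix
  · rintro ⟨s, t, rfl⟩
    refine ⟨s.length, ?_, ?_⟩
    · simp only [List.length_append, hL]
      omega
    · rw [List.append_assoc, List.drop_left, ← hL, List.take_left]

-- the keyword looked up at position i of low, length L
def pvKey (low : String) (i L : Nat) : List String :=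
  PySem.Dict.getD pvKwMap (PySem.Str.slice low (some (i : Int)) (some ((i : Int) + (L : Int)))) []

-- membership in the inner (position) loop
lemma pvMemInner (low : String) (L : Nat) (a : PySem.Set String) (x : String) :
    x ∈ (List.range (low.toList.length + 1 - L)).foldl
        (fun hit (i : Nat) => PySem.Set.update hit (pvKey low i L)) a ↔
      x ∈ a ∨ ∃ i, i < low.toList.length + 1 - L ∧ x ∈ pvKey low i L := by
  rw [pvMemFoldl (fun i hit => PySem.Set.update hit (pvKey low i L))
      (fun i x => x ∈ pvKey low i L) (fun e a x => PySem.Set.mem_update a _ x)]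
  simp [List.mem_range]

-- characterisation of the hit set
lemma pvHits_mem (low : String) (c : String) :
    c ∈ pvHits low ↔ ∃ p ∈ pvKwMap.items, c ∈ p.2 ∧ PySem.Str.isIn p.1 low = true := by
  have hlen : ∀ p ∈ pvKwMap.items, p.1.toList.length ∈ pvLens := by decide
  have h1 : c ∈ pvHits low ↔ c ∈ (PySem.Set.empty : PySem.Set String) ∨
      ∃ L ∈ pvLens, ∃ i, i < low.toList.length + 1 - L ∧ c ∈ pvKey low i L :=
    pvMemFoldl
      (fun L hit => (List.range (low.toList.length + 1 - L)).foldl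
        (fun hit (i : Nat) => PySem.Set.update hit (pvKey low i L)) hit)
      (fun L x => ∃ i, i < low.toList.length + 1 - L ∧ x ∈ pvKey low i L)
      (fun L a x => pvMemInner low L a x) pvLens PySem.Set.empty c
  rw [h1]
  simp only [PySem.Set.empty, List.mem_nil_iff, false_or]
  have hslice : ∀ (i L : Nat),
      (PySem.Str.slice low (some (i : Int)) (some ((i : Int) + (L : Int)))).toList
        = (low.toList.drop i).take L := by
    intro i L
    simp [PySem.Str.toList_slice, PySem.List.slice_natCast_add]
  constructor
  · rintro ⟨L, _, i, hi, hmem⟩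
    rcases (pvGetD_mem _ _).mp hmem with ⟨p, hp, hkey, hc⟩
    refine ⟨p, hp, hc, ?_⟩
    rw [PySem.Str.isIn_iff_infix]
    have hLen : p.1.toList.length = L := by
      rw [hkey, hslice]
      simp only [List.length_take, List.length_drop]
      omega
    refine (pvSliceInfix low.toList p.1.toList L hLen).mp ⟨i, hi, ?_⟩
    rw [← hslice, hkey]
  · rintro ⟨p, hp, hc, hin⟩
    rw [PySem.Str.isIn_iff_infix] at hin
    rcases (pvSliceInfix low.toList p.1.toList p.1.toList.length rfl).mpr hin with ⟨i, hi, htake⟩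
    refine ⟨p.1.toList.length, hlen p hp, i, hi, ?_⟩
    apply (pvGetD_mem _ _).mpr
    refine ⟨p, hp, ?_, hc⟩
    apply String.toList_injective
    rw [hslice, htake]

-- per-category: hit-set membership ↔ A's any-keyword test
lemma pvHitCat (ws : List String) (c : String)
    (h1 : ∀ p ∈ pvKwMap.items, c ∈ p.2 ↔ p.1 ∈ ws)
    (h2 : ∀ w ∈ ws, ∃ p ∈ pvKwMap.items, p.1 = w ∧ c ∈ p.2)
    (cl : String) :
    PySem.Set.contains (pvHits cl) c = pvAnyA ws cl := by
  rw [Bool.eq_iff_iff, PySem.Set.contains_iff, pvHits_mem, pvAnyA, List.any_eq_true]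
  constructor
  · rintro ⟨p, hp, hc, hin⟩
    exact ⟨p.1, (h1 p hp).mp hc, hin⟩
  · rintro ⟨w, hw, hin⟩
    rcases h2 w hw with ⟨p, hp, rfl, hc⟩
    exact ⟨p, hp, hc, hin⟩

-- B's per-category list is A's filter, given the pointwise equality of the tests
lemma pvFilterMap (cols : List String) (c : String) (ws : List String)
    (h : ∀ col, PySem.Set.contains (pvHits (PySem.Str.lower col)) c = pvAnyA ws (PySem.Str.lower col)) :
    ((cols.map (fun col => (col, pvHits (PySem.Str.lower col)))).filter
        (fun p => PySem.Set.contains p.2 c)).map (fun p => p.1) = pvFilt ws cols := by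
  induction cols with
  | nil => rfl
  | cons x xs ih =>
    simp only [List.map_cons, List.filter_cons, h x, pvFilt, List.filter_cons]
    by_cases hx : pvAnyA ws (PySem.Str.lower x) = true <;>
      simp only [hx, if_true, List.map_cons] <;>
      simpa [pvFilt] using ih

theorem pvMain : ∀ (columns : List String),
    identify_business_columns_py columns = identify_business_columns_py_alt columns := by
  intro columns
  have hcat : ∀ (ws : List String) (c : String),
      (∀ p ∈ pvKwMap.items, c ∈ p.2 ↔ p.1 ∈ ws) →
      (∀ w ∈ ws, ∃ p ∈ pvKwMap.items, p.1 = w ∧ c ∈ p.2) →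
      ((columns.map (fun col => (col, pvHits (PySem.Str.lower col)))).filter
          (fun p => PySem.Set.contains p.2 c)).map (fun p => p.1) = pvFilt ws columns := by
    intro ws c h1 h2
    exact pvFilterMap columns c ws (fun col => pvHitCat ws c h1 h2 _)
  simp only [identify_business_columns_py, identify_business_columns_py_alt, pvCats,
    pvFoldA_eq, List.map_cons, List.map_nil, List.nil_append]
  rw [hcat ["price", "payment", "value", "cost", "revenue"] "price_metrics" (by decide) (by decide),
      hcat ["price", "payment", "value", "cost", "revenue"] "sales_metrics" (by decide) (by decide),
      hcat ["qty", "quantity", "count", "number", "total"] "quantity_metrics" (by decide) (by decide),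
      hcat ["date", "time", "timestamp", "created", "updated"] "time_metrics" (by decide) (by decide),
      hcat ["city", "state", "zip", "location", "geo", "lat", "lng"] "geographic_metrics" (by decide) (by decide),
      hcat ["score", "rating", "review", "satisfaction"] "quality_metrics" (by decide) (by decide),
      hcat ["id", "key", "code"] "identifier_columns" (by decide) (by decide),
      hcat ["weight", "length", "height", "width", "cm", "kg"] "physical_dimensions" (by decide) (by decide)]

-- ===== VERDICT (by name: the statement is the Claim_ definition above) =====
theorem identify_business_columns_py_spec : Claim_equal_identify_business_columns_py := by
  intro columns _
  unfold Spec_identify_business_columns_py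
  exact pvMain columns
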